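-- pv_equiv track=rewrite | github.com/DanielDimitrov46/SoftUni | Python Fundamentals/TextProcessing/TextProcessingExercise/10.winning_ticket.py | is_winning
-- ===== SOURCE A (Python) =====
-- def is_winning(ticket):
--     if len(ticket) != 20:
--         return "invalid ticket"
--     left_side = ticket[:10]
--     right_side = ticket[10:]
--     winning_symbols = ["@", "#", "$", "^"]
--     for winning_symbol in winning_symbols:
--         for repetition in range(10,5,-1):
--             winning_symbol_repetition = repetition*winning_symbol
--             if winning_symbol_repetition in left_side and winning_symbol_repetition in right_side:
--                 if repetition==10:
--                     return f'ticket "{ticket}" - {repetition}{winning_symbol} Jackpot!'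
--                 return f'ticket "{ticket}" - {repetition}{winning_symbol}'
--     return f'ticket "{ticket}" - no match'
-- ===== SOURCE B (Python) =====
-- def is_winning(ticket):
--     if len(ticket) != 20:
--         return "invalid ticket"
--     left_side = ticket[:10]
--     right_side = ticket[10:]
--
--     def max_run(side, symbol):
--         best = cur = 0
--         for ch in side:
--             cur = cur + 1 if ch == symbol else 0
--             best = max(best, cur)
--         return best
--
--     for symbol in "@#$^":
--         matched = min(max_run(left_side, symbol), max_run(right_side, symbol))
--         if matched >= 6:
--             return f'ticket "{ticket}" - {matched}{symbol}' + (" Jackpot!" if matched == 10 else "")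
--     return f'ticket "{ticket}" - no match'
-- ===== Notes on version B (the rewrite author's own statement) =====
-- stated objective: alternative
-- what changed: A generates the candidate strings k*symbol for k=10..6 and tests substring membership in each half; B instead computes, in one scan per half, the maximum consecutive run length of each symbol and takes matched = min(left_run, right_run), returning a win when matched >= 6 (Jackpot at 10).
import Mathlib
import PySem

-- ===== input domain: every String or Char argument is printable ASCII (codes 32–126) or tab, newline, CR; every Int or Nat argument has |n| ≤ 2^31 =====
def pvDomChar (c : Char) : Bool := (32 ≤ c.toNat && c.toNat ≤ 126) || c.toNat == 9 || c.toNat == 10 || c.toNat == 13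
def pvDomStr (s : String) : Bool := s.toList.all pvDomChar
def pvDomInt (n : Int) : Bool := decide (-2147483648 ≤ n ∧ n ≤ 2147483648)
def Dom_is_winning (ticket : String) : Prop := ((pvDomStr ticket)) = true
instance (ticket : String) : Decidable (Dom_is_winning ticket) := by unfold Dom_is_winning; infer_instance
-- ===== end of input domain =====

-- B replaces A's candidate-substring search (building k*symbol strings and testing membership)
-- by a direct single-scan maximum-run-length computation per side; objective: alternative/idiomatic.

-- ===== PORT A =====
-- inner loop: for repetition in range(10,5,-1)
def innerA (ticket : String) (left right : List Char) (sym : Char) : List Int → Option String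
  | [] => none
  | rep :: rest =>
    let wrep := PySem.List.pyRepeat [sym] rep
    if PySem.Chars.isIn wrep left && PySem.Chars.isIn wrep right then
      if rep == 10 then
        some ("ticket \"" ++ ticket ++ "\" - " ++ PySem.Int.toStr rep ++ String.ofList [sym] ++ " Jackpot!")
      else
        some ("ticket \"" ++ ticket ++ "\" - " ++ PySem.Int.toStr rep ++ String.ofList [sym])
    else innerA ticket left right sym rest

-- outer loop: for winning_symbol in winning_symbols
def outerA (ticket : String) (left right : List Char) : List Char → Option String
  | [] => none
  | sym :: rest =>
    match innerA ticket left right sym (PySem.List.pyRange 10 5 (-1)) with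
    | some r => some r
    | none => outerA ticket left right rest

def is_winning (ticket : String) : String :=
  if PySem.Str.len ticket ≠ 20 then "invalid ticket"
  else
    let t := ticket.toList
    let left := PySem.List.slice t none (some 10)
    let right := PySem.List.slice t (some 10) none
    (outerA ticket left right ['@', '#', '$', '^']).getD ("ticket \"" ++ ticket ++ "\" - no match")

-- ===== PORT B =====
-- max_run: one scan tracking (best, cur)
def maxRunB (side : List Char) (symbol : Char) : Nat :=
  (side.foldl (fun (p : Nat × Nat) ch =>
      let cur := if ch == symbol then p.2 + 1 else 0
      (max p.1 cur, cur)) (0, 0)).1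

def loopB (ticket : String) (left right : List Char) : List Char → String
  | [] => "ticket \"" ++ ticket ++ "\" - no match"
  | sym :: rest =>
    let matched := min (maxRunB left sym) (maxRunB right sym)
    if 6 ≤ matched then
      ("ticket \"" ++ ticket ++ "\" - " ++ PySem.Int.toStr (matched : Int) ++ String.ofList [sym])
        ++ (if matched == 10 then " Jackpot!" else "")
    else loopB ticket left right rest

def is_winning_alt (ticket : String) : String :=
  if PySem.Str.len ticket ≠ 20 then "invalid ticket"
  else
    let t := ticket.toList
    let left := PySem.List.slice t none (some 10)
    let right := PySem.List.slice t (some 10) none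
    loopB ticket left right ("@#$^").toList

-- ===== PRECONDITION & SPEC =====
def Spec_is_winning (ticket : String) (out : String) : Prop := out = is_winning_alt ticket
instance (ticket : String) (out : String) : Decidable (Spec_is_winning ticket out) := by unfold Spec_is_winning; infer_instance

-- ===== CLAIM (what is proved, stated in full; the proofs are below) =====
def Claim_equal_is_winning : Prop := ∀ (ticket : String), Dom_is_winning ticket → Spec_is_winning ticket (is_winning ticket)

-- ===== LEMMAS AND PROOFS =====

-- length of the leading run of c
def leadRun (c : Char) : List Char → Nat
  | [] => 0
  | x :: xs => if x == c then leadRun c xs + 1 else 0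

-- maximum run of c, given an incoming run of length cur (structural form of B's scan)
def runF (c : Char) (cur : Nat) : List Char → Nat
  | [] => 0
  | x :: xs => let cur' := if x == c then cur + 1 else 0; max cur' (runF c cur' xs)

lemma foldl_run (c : Char) : ∀ (xs : List Char) (b cur : Nat),
    (xs.foldl (fun (p : Nat × Nat) ch =>
      let cur := if ch == c then p.2 + 1 else 0
      (max p.1 cur, cur)) (b, cur)).1 = max b (runF c cur xs) := by
  intro xs
  induction xs with
  | nil => intro b cur; simp [runF]
  | cons x xs ih =>
    intro b cur
    simp only [List.foldl_cons, runF, ih, Nat.max_assoc]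

lemma maxRunB_eq (side : List Char) (c : Char) : maxRunB side c = runF c 0 side := by
  unfold maxRunB
  rw [foldl_run c side 0 0]
  omega

lemma runF_shift (c : Char) : ∀ (xs : List Char) (j : Nat),
    runF c j xs = max (runF c 0 xs) (if 0 < leadRun c xs then j + leadRun c xs else 0) := by
  intro xs
  induction xs with
  | nil => intro j; simp [runF, leadRun]
  | cons x xs ih =>
    intro j
    by_cases hx : x == c <;> simp only [runF, leadRun, hx, Bool.false_eq_true, if_true, if_false]
    · rw [ih (j + 1), ih 1]
      by_cases hl : 0 < leadRun c xs <;> simp [hl] <;> omega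
    · rw [ih 0]
      simp

lemma lead_le_runF (c : Char) : ∀ xs : List Char, leadRun c xs ≤ runF c 0 xs := by
  intro xs
  cases xs with
  | nil => simp [leadRun, runF]
  | cons x xs =>
    by_cases hx : x == c <;> simp only [runF, leadRun, hx, Bool.false_eq_true, if_true, if_false]
    · rw [runF_shift c xs 1]
      by_cases hl : 0 < leadRun c xs <;> simp [hl] <;> omega
    · exact Nat.zero_le _

lemma prefix_replicate (c : Char) : ∀ (ys : List Char) (k : Nat),
    (List.replicate k c <+: ys) ↔ k ≤ leadRun c ys := by
  intro ys
  induction ys with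
  | nil =>
    intro k
    cases k <;> simp [leadRun, List.replicate_succ]
  | cons y ys ih =>
    intro k
    cases k with
    | zero => simp [List.replicate]
    | succ n =>
      by_cases h : y == c
      · have hy : y = c := by simpa using h
        simp [List.replicate_succ, List.cons_prefix_cons, hy, ih, leadRun]
      · have hy : ¬ (c = y) := by intro e; subst e; simp at h
        simp [List.replicate_succ, List.cons_prefix_cons, hy, leadRun, h]

lemma infix_replicate (c : Char) : ∀ (xs : List Char) (k : Nat),
    (List.replicate k c <:+: xs) ↔ k ≤ runF c 0 xs := by
  intro xs
  induction xs with
  | nil =>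
    intro k
    cases k <;> simp [runF, List.replicate_succ]
  | cons x xs ih =>
    intro k
    rw [List.infix_cons_iff, prefix_replicate, ih]
    have hle := lead_le_runF c xs
    by_cases h : x == c <;>
      simp only [runF, leadRun, h, Bool.false_eq_true, if_true, if_false]
    · rw [runF_shift c xs 1]
      by_cases hl : 0 < leadRun c xs <;> simp [hl] <;> omega
    · simp; omega

lemma runF_le_length (c : Char) : ∀ (xs : List Char) (cur : Nat),
    runF c cur xs ≤ cur + xs.length := by
  intro xs
  induction xs with
  | nil => intro cur; simp [runF]
  | cons x xs ih =>
    intro cur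
    by_cases h : x == c <;>
      simp only [runF, h, Bool.false_eq_true, if_true, if_false, List.length_cons] <;>
      [have := ih (cur + 1); have := ih 0] <;> omega

lemma isIn_rep (c : Char) (xs : List Char) (n : Int) :
    PySem.Chars.isIn (PySem.List.pyRepeat [c] n) xs = decide (n.toNat ≤ runF c 0 xs) := by
  rw [PySem.List.pyRepeat_singleton]
  cases hb : PySem.Chars.isIn (List.replicate n.toNat c) xs
  · have h := (PySem.Chars.isIn_eq_false_iff _ _).mp hb
    rw [infix_replicate] at h
    simp [h]
  · have h := (PySem.Chars.isIn_iff_infix _ _).mp hb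
    rw [infix_replicate] at h
    simp [h]

lemma pyRange_desc : PySem.List.pyRange 10 5 (-1) = [10, 9, 8, 7, 6] := by decide

lemma innerA_eq (ticket : String) (l r : List Char) (sym : Char)
    (hl : runF sym 0 l ≤ 10) (hr : runF sym 0 r ≤ 10) :
    innerA ticket l r sym (PySem.List.pyRange 10 5 (-1)) =
      (if 6 ≤ min (runF sym 0 l) (runF sym 0 r) then
        some (("ticket \"" ++ ticket ++ "\" - "
            ++ PySem.Int.toStr ((min (runF sym 0 l) (runF sym 0 r) : Nat) : Int) ++ String.ofList [sym])
          ++ (if min (runF sym 0 l) (runF sym 0 r) == 10 then " Jackpot!" else ""))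
      else none) := by
  rw [pyRange_desc]
  have hcond : ∀ k : Nat, (PySem.Chars.isIn (PySem.List.pyRepeat [sym] (k : Int)) l
      && PySem.Chars.isIn (PySem.List.pyRepeat [sym] (k : Int)) r)
      = decide (k ≤ min (runF sym 0 l) (runF sym 0 r)) := by
    intro k
    rw [isIn_rep, isIn_rep]
    simp
    tauto
  set a := runF sym 0 l with ha
  set b := runF sym 0 r with hb
  have hm : min a b ≤ 10 := by omega
  simp only [innerA]
  rw [show ((10 : Int)) = ((10 : Nat) : Int) from by norm_num,
      show ((9 : Int)) = ((9 : Nat) : Int) from by norm_num,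
      show ((8 : Int)) = ((8 : Nat) : Int) from by norm_num,
      show ((7 : Int)) = ((7 : Nat) : Int) from by norm_num,
      show ((6 : Int)) = ((6 : Nat) : Int) from by norm_num]
  rw [hcond 10, hcond 9, hcond 8, hcond 7, hcond 6]
  generalize hmm : min a b = m at *
  interval_cases m <;> norm_num [innerA]

lemma loop_eq (ticket : String) (l r : List Char)
    (hl : ∀ s, runF s 0 l ≤ 10) (hr : ∀ s, runF s 0 r ≤ 10) :
    ∀ syms : List Char,
      (outerA ticket l r syms).getD ("ticket \"" ++ ticket ++ "\" - no match")
        = loopB ticket l r syms := by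
  intro syms
  induction syms with
  | nil => simp [outerA, loopB]
  | cons sym rest ih =>
    simp only [outerA, loopB, innerA_eq ticket l r sym (hl sym) (hr sym), maxRunB_eq]
    by_cases h : 6 ≤ min (runF sym 0 l) (runF sym 0 r)
    · simp [h]
    · simp [h, ih]

-- ===== VERDICT (by name: the statement is the Claim_ definition above) =====
theorem is_winning_spec : Claim_equal_is_winning := by
  intro ticket _
  unfold Spec_is_winning is_winning is_winning_alt
  by_cases hlen : PySem.Str.len ticket = 20
  case neg => rw [if_pos hlen, if_pos hlen]
  case pos =>
    have hlen20 : ticket.toList.length = 20 := by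
      have h := PySem.Str.len_eq ticket
      rw [hlen] at h
      rw [String.length_toList]
      exact_mod_cast h.symm
    rw [if_neg (by simp [hlen20]), if_neg (by simp [hlen20])]
    have hslice_l : PySem.List.slice ticket.toList none (some 10) = ticket.toList.take 10 := by
      rw [show ((10 : Int)) = ((10 : Nat) : Int) from by norm_num, PySem.List.slice_to_natCast]
    have hslice_r : PySem.List.slice ticket.toList (some 10) none = ticket.toList.drop 10 := by
      rw [show ((10 : Int)) = ((10 : Nat) : Int) from by norm_num, PySem.List.slice_from_natCast]
    have hlenl : (PySem.List.slice ticket.toList none (some 10)).length = 10 := by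
      rw [hslice_l, List.length_take]; omega
    have hlenr : (PySem.List.slice ticket.toList (some 10) none).length = 10 := by
      rw [hslice_r, List.length_drop]; omega
    have hstr : ("@#$^").toList = ['@', '#', '$', '^'] := by rfl
    rw [hstr]
    rw [loop_eq]
    · intro s; have := runF_le_length s (PySem.List.slice ticket.toList none (some 10)) 0; omega
    · intro s; have := runF_le_length s (PySem.List.slice ticket.toList (some 10) none) 0; omega
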